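-- pv_equiv track=rewrite | github.com/KatherineHopeReece/Fire-Engine-Framework | ignacio/ignition.py | get_fuel_codes
-- ===== SOURCE A (Python) =====
-- def get_fuel_codes(fuel_type_names: list[str], fuel_lookup: dict[int, str]) -> list[int]:
--     """
--     Get numeric fuel codes for named fuel types.
--
--     Parameters
--     ----------
--     fuel_type_names : list[str]
--         List of FBP fuel type codes (e.g., ["D-1", "O-1a"]).
--     fuel_lookup : dict
--         Mapping of numeric codes to fuel type names.
--
--     Returns
--     -------
--     list[int]
--         Numeric codes corresponding to the fuel types.
--     """
--     # Reverse the lookup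
--     name_to_code = {v: k for k, v in fuel_lookup.items()}
--
--     codes = []
--     for name in fuel_type_names:
--         name_upper = name.upper().strip()
--         if name_upper in name_to_code:
--             codes.append(name_to_code[name_upper])
--
--     return codes
-- ===== SOURCE B (Python) =====
-- def get_fuel_codes(fuel_type_names: list[str], fuel_lookup: dict[int, str]) -> list[int]:
--     # Inverted data flow: index the REQUESTED names by normalized form, then make
--     # one pass over the lookup filling an answer slot per name position (later
--     # lookup items overwrite earlier ones, i.e. last key wins), and finally emit
--     # the filled slots in name order.
--     positions = {}
--     for i, name in enumerate(fuel_type_names):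
--         positions.setdefault(name.upper().strip(), []).append(i)
--     resolved = {}
--     for code, fuel_name in fuel_lookup.items():
--         for i in positions.get(fuel_name, []):
--             resolved[i] = code
--     return [resolved[i] for i, _ in enumerate(fuel_type_names) if i in resolved]
-- ===== Notes on version B (the rewrite author's own statement) =====
-- stated objective: alternative
-- what changed: B never reverses the lookup dict: it groups the requested name positions by normalized form, then makes a single pass over the lookup items writing each matching position's answer slot (later items overwrite, giving last-key-wins), and emits the filled slots in name order.
import Mathlib
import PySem

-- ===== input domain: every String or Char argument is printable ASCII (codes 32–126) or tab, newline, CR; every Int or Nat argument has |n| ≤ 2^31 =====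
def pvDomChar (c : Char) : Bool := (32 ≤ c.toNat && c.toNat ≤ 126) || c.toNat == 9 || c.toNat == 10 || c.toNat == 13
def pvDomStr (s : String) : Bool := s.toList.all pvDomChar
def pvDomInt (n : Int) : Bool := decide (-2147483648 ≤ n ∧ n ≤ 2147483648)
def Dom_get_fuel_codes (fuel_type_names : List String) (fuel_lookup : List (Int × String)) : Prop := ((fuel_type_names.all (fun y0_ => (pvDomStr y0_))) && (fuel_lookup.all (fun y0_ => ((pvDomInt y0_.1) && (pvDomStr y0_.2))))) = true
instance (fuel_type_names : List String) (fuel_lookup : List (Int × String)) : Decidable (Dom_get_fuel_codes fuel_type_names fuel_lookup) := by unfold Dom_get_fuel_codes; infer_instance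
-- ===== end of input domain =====

-- B inverts A's data flow: instead of a reverse value->key dict, it groups name positions by normalized form and fills answer slots in one pass over the lookup items (alternative decomposition, same results).


-- ===== PORT A =====
-- the dict parameter is received as its items list; Dict.ofList models Python's dict construction (duplicate keys overwrite in place)
def get_fuel_codes (fuel_type_names : List String) (fuel_lookup : List (Int × String)) : List Int :=
  let items := (PySem.Dict.ofList fuel_lookup).items
  -- name_to_code = {v: k for k, v in fuel_lookup.items()}
  let name_to_code : PySem.Dict String Int :=
    items.foldl (fun d kv => d.insert kv.2 kv.1) PySem.Dict.empty
  fuel_type_names.foldl (fun codes name =>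
    let name_upper := PySem.Str.strip (PySem.Str.upper name)
    match name_to_code.get? name_upper with
    | some k => codes ++ [k]
    | none => codes) []

-- ===== PORT B =====
def get_fuel_codes_alt (fuel_type_names : List String) (fuel_lookup : List (Int × String)) : List Int :=
  let items := (PySem.Dict.ofList fuel_lookup).items
  -- positions.setdefault(name.upper().strip(), []).append(i)  ==  modify key [] (· ++ [i])
  let positions : PySem.Dict String (List Int) :=
    (PySem.List.enumerate fuel_type_names).foldl (fun d p =>
      d.modify (PySem.Str.strip (PySem.Str.upper p.2)) [] (· ++ [p.1])) PySem.Dict.empty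
  -- for code, fuel_name in items: for i in positions.get(fuel_name, []): resolved[i] = code
  let resolved : PySem.Dict Int Int :=
    items.foldl (fun r kv =>
      (positions.getD kv.2 []).foldl (fun r i => r.insert i kv.1) r) PySem.Dict.empty
  -- [resolved[i] for i, _ in enumerate(names) if i in resolved]
  (PySem.List.enumerate fuel_type_names).foldl (fun out p =>
    match resolved.get? p.1 with
    | some k => out ++ [k]
    | none => out) []

-- ===== PRECONDITION & SPEC =====
def Spec_get_fuel_codes (fuel_type_names : List String) (fuel_lookup : List (Int × String)) (out : List Int) : Prop := out = get_fuel_codes_alt fuel_type_names fuel_lookup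
instance (fuel_type_names : List String) (fuel_lookup : List (Int × String)) (out : List Int) : Decidable (Spec_get_fuel_codes fuel_type_names fuel_lookup out) := by unfold Spec_get_fuel_codes; infer_instance

-- ===== CLAIM (what is proved, stated in full; the proofs are below) =====
def Claim_equal_get_fuel_codes : Prop := ∀ (fuel_type_names : List String) (fuel_lookup : List (Int × String)), Dom_get_fuel_codes fuel_type_names fuel_lookup → Spec_get_fuel_codes fuel_type_names fuel_lookup (get_fuel_codes fuel_type_names fuel_lookup)

-- ===== LEMMAS AND PROOFS =====

-- last item of `items` whose value equals t, as a left fold (overwrite on match)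
def lastWins (items : List (Int × String)) (t : String) : Option Int :=
  items.foldl (fun f kv => if kv.2 == t then some kv.1 else f) none

-- lookup in the reverse dict built by a left fold = last matching value's key
lemma get?_foldl_rev (items : List (Int × String)) (d : PySem.Dict String Int) (t : String) :
    (items.foldl (fun d kv => d.insert kv.2 kv.1) d).get? t
      = items.foldl (fun f kv => if kv.2 == t then some kv.1 else f) (d.get? t) := by
  induction items generalizing d with
  | nil => rfl
  | cons kv rest ih =>
    simp only [List.foldl]
    rw [ih]
    congr 1
    rw [PySem.Dict.get?_insert]
    by_cases h : kv.2 = t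
    · simp [h]
    · simp [h, Ne.symm h]

-- A's per-name contribution to the output
def contrib (fuel_lookup : List (Int × String)) (name : String) : List Int :=
  match lastWins (PySem.Dict.ofList fuel_lookup).items (PySem.Str.strip (PySem.Str.upper name)) with
  | some k => [k]
  | none => []

lemma a_eq_flatMap (names : List String) (fl : List (Int × String)) :
    get_fuel_codes names fl = names.flatMap (contrib fl) := by
  dsimp only [get_fuel_codes]
  refine (PySem.List.foldl_congr_mem _ _
    (fun acc x => acc ++ contrib fl x) _ ?_).trans ?_
  · intro acc x _
    beta_reduce
    unfold contrib lastWins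
    rw [get?_foldl_rev, PySem.Dict.get?_empty]
    cases h : (PySem.Dict.ofList fl).items.foldl
        (fun f kv => if kv.2 == PySem.Str.strip (PySem.Str.upper x) then some kv.1 else f) none with
    | none => simp
    | some v => simp
  · rw [PySem.List.foldl_append_eq_flatMap, List.nil_append]

-- the position list a normalized form maps to
lemma getD_positions (names : List String) (t : String) :
    ((PySem.List.enumerate names).foldl (fun d p =>
        d.modify (PySem.Str.strip (PySem.Str.upper p.2)) [] (· ++ [p.1]))
        (PySem.Dict.empty : PySem.Dict String (List Int))).getD t []
      = (((PySem.List.enumerate names).map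
            (fun p => (PySem.Str.strip (PySem.Str.upper p.2), p.1))).filter
            (fun q => q.1 == t)).map (·.2) := by
  have h : (((PySem.List.enumerate names).map
        (fun p => (PySem.Str.strip (PySem.Str.upper p.2), p.1))).foldl
        (fun d q => d.modify q.1 [] (· ++ [q.2])) (PySem.Dict.empty : PySem.Dict String (List Int)))
      = ((PySem.List.enumerate names).foldl (fun d p =>
        d.modify (PySem.Str.strip (PySem.Str.upper p.2)) [] (· ++ [p.1]))
        (PySem.Dict.empty : PySem.Dict String (List Int))) := by
    rw [List.foldl_map]
  rw [← h, PySem.Dict.getD_foldl_modify_append]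
  simp

-- writing one code into every slot of a position list
lemma get?_foldl_insert_const (L : List Int) (k i : Int) (r : PySem.Dict Int Int) :
    (L.foldl (fun r j => r.insert j k) r).get? i
      = if i ∈ L then some k else r.get? i := by
  induction L generalizing r with
  | nil => simp
  | cons j L ih =>
    simp only [List.foldl, ih, PySem.Dict.get?_insert, List.mem_cons]
    by_cases hL : i ∈ L
    · simp [hL]
    · by_cases hj : i = j <;> simp [hL, hj]

-- the resolved slot of position i = last item whose position list contains i
lemma get?_resolved (items : List (Int × String)) (pos : Int × String → List Int)
    (i : Int) (r : PySem.Dict Int Int) :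
    (items.foldl (fun r kv => (pos kv).foldl (fun r j => r.insert j kv.1) r) r).get? i
      = items.foldl (fun f kv => if i ∈ pos kv then some kv.1 else f) (r.get? i) := by
  induction items generalizing r with
  | nil => rfl
  | cons kv rest ih =>
    simp only [List.foldl]
    rw [ih, get?_foldl_insert_const]

-- membership in the position list of t ↔ t is the normalized form at that index
lemma mem_positions (names : List String) (t : String) (k : Nat) (hk : k < names.length) :
    ((k : Int) ∈ (((PySem.List.enumerate names).map
        (fun p => (PySem.Str.strip (PySem.Str.upper p.2), p.1))).filter
        (fun q => q.1 == t)).map (·.2))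
      ↔ PySem.Str.strip (PySem.Str.upper names[k]) = t := by
  simp only [List.mem_map, List.mem_filter, List.mem_map, PySem.List.mem_enumerate_iff]
  constructor
  · rintro ⟨q, ⟨⟨p, ⟨j, hj, rfl⟩, rfl⟩, ht⟩, hq⟩
    simp only [beq_iff_eq] at ht
    simp only [Int.zero_add] at hq ⊢
    have : j = k := by exact_mod_cast hq
    subst this; exact ht
  · intro ht
    exact ⟨(t, (k : Int)), ⟨⟨(((k : Int)), names[k]), ⟨k, hk, by simp⟩, by simp [ht]⟩, by simp⟩, rfl⟩

lemma alt_eq_flatMap (names : List String) (fl : List (Int × String)) :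
    get_fuel_codes_alt names fl = names.flatMap (contrib fl) := by
  dsimp only [get_fuel_codes_alt]
  refine (PySem.List.foldl_congr_mem _ _
    (fun (acc : List Int) (p : Int × String) => acc ++ contrib fl p.2) _ ?_).trans ?_
  · intro acc p hp
    beta_reduce
    rw [PySem.List.mem_enumerate_iff] at hp
    obtain ⟨k, hk, rfl⟩ := hp
    rw [get?_resolved, PySem.Dict.get?_empty]
    have hfold : (PySem.Dict.ofList fl).items.foldl
        (fun f kv => if (((0 : Int) + (k : Int), names[k]) : Int × String).1 ∈
            (((PySem.List.enumerate names).foldl (fun d p =>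
              d.modify (PySem.Str.strip (PySem.Str.upper p.2)) [] (· ++ [p.1]))
              (PySem.Dict.empty : PySem.Dict String (List Int))).getD kv.2 []) then some kv.1 else f) none
        = lastWins (PySem.Dict.ofList fl).items (PySem.Str.strip (PySem.Str.upper names[k])) := by
      unfold lastWins
      apply PySem.List.foldl_congr_mem
      intro f kv _
      rw [getD_positions]
      have hiff := mem_positions names kv.2 k hk
      by_cases hmem : PySem.Str.strip (PySem.Str.upper names[k]) = kv.2
      · simp only [Int.zero_add]
        simp [hiff.mpr hmem, hmem]
      · have hnot : ¬ ((k : Int) ∈ (((PySem.List.enumerate names).map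
            (fun p => (PySem.Str.strip (PySem.Str.upper p.2), p.1))).filter
            (fun q => q.1 == kv.2)).map (·.2)) := fun h => hmem (hiff.mp h)
        simp only [Int.zero_add]
        simp [hnot]
        exact fun hc => absurd hc.symm hmem
    rw [hfold]
    unfold contrib
    cases h : lastWins (PySem.Dict.ofList fl).items (PySem.Str.strip (PySem.Str.upper names[k])) with
    | none => simp
    | some v => simp
  · rw [PySem.List.foldl_append_eq_flatMap, List.nil_append]
    have hsnd : names.flatMap (contrib fl)
        = ((PySem.List.enumerate names).map (·.2)).flatMap (contrib fl) := by
      rw [PySem.List.map_snd_enumerate]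
    rw [hsnd, List.flatMap_map]

-- ===== VERDICT (by name: the statement is the Claim_ definition above) =====
theorem get_fuel_codes_spec : Claim_equal_get_fuel_codes := by
  intro names fl _
  unfold Spec_get_fuel_codes
  rw [a_eq_flatMap, alt_eq_flatMap]
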